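-- pv_equiv track=rewrite | github.com/Francmata/io-grupo6-proyecto2 | mina.py | maximoEtapaInicial
-- ===== SOURCE A (Python) =====
-- def maximoEtapaInicial(etapa):
--     numero = etapa[1][-2]
--     resultado = []
--     for x in range(1,len(etapa)):
--         if(etapa[x][-2]> numero):
--             resultado = []
--             resultado+=[etapa[x][0]]
--             numero = etapa[x][-2]
--         elif(etapa[x][-2] == numero):
--             resultado+=[etapa[x][0]]
--     return resultado
-- ===== SOURCE B (Python) =====
-- def maximoEtapaInicial(etapa):
--     filas = etapa[1:]
--     numero = max(fila[-2] for fila in filas)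
--     return [fila[0] for fila in filas if fila[-2] == numero]
-- ===== Notes on version B (the rewrite author's own statement) =====
-- stated objective: simpler
-- what changed: Replaced the running-max-with-reset single pass by a two-pass compute-max-then-filter decomposition: first the maximum of row[-2] over etapa[1:], then a comprehension collecting row[0] of the rows attaining it.
import Mathlib
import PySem

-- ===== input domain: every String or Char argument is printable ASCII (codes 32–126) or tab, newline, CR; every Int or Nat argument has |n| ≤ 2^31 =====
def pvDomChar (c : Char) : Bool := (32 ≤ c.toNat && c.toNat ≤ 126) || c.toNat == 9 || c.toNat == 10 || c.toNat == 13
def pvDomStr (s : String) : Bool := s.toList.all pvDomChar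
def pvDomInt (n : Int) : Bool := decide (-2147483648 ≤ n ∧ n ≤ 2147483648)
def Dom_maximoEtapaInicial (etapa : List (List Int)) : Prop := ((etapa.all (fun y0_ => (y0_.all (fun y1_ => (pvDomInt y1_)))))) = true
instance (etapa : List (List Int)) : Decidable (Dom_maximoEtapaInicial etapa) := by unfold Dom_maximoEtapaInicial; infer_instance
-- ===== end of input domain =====

-- B replaces A's running-max-with-reset single pass by a two-pass compute-max-then-filter
-- decomposition (simpler); same return value on all inputs where A returns.

-- ===== PORT A =====
def maximoEtapaInicial (etapa : List (List Int)) : List Int :=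
  let numero : Int := PySem.List.pyGetD (PySem.List.pyGetD etapa 1 []) (-2) 0
  -- for x in range(1, len(etapa)): running max with reset
  let st : List Int × Int :=
    (PySem.List.pyRange 1 (etapa.length : Int) 1).foldl
      (fun (p : List Int × Int) x =>
        let fila := PySem.List.pyGetD etapa x []
        if PySem.List.pyGetD fila (-2) 0 > p.2 then
          ([PySem.List.pyGetD fila 0 0], PySem.List.pyGetD fila (-2) 0)
        else if PySem.List.pyGetD fila (-2) 0 == p.2 then
          (p.1 ++ [PySem.List.pyGetD fila 0 0], p.2)
        else p)
      ([], numero)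
  st.1

-- ===== PORT B =====
def maximoEtapaInicial_alt (etapa : List (List Int)) : List Int :=
  let filas := etapa.drop 1            -- etapa[1:]
  match PySem.List.max? (filas.map (fun fila => PySem.List.pyGetD fila (-2) 0)) (fun v => v) with
  | none => []                         -- Python raises ValueError here (outside Pre_)
  | some numero =>
      (filas.filter (fun fila => PySem.List.pyGetD fila (-2) 0 == numero)).map
        (fun fila => PySem.List.pyGetD fila 0 0)

-- ===== PRECONDITION & SPEC =====
-- Pre_ excludes exactly the inputs where Python A raises IndexError:
-- fewer than two rows, or a row after the first with fewer than two elements.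
def Pre_maximoEtapaInicial (etapa : List (List Int)) : Prop :=
  2 ≤ etapa.length ∧ ∀ fila ∈ etapa.drop 1, 2 ≤ fila.length
instance (etapa : List (List Int)) : Decidable (Pre_maximoEtapaInicial etapa) := by
  unfold Pre_maximoEtapaInicial; infer_instance
def pvWitness_maximoEtapaInicial : List (List Int) := [[0, 0], [1, 2], [3, 2]]

def Spec_maximoEtapaInicial (etapa : List (List Int)) (out : List Int) : Prop := out = maximoEtapaInicial_alt etapa
instance (etapa : List (List Int)) (out : List Int) : Decidable (Spec_maximoEtapaInicial etapa out) := by unfold Spec_maximoEtapaInicial; infer_instance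

-- ===== CLAIM (what is proved, stated in full; the proofs are below) =====
def Claim_equal_maximoEtapaInicial : Prop := ∀ (etapa : List (List Int)), Dom_maximoEtapaInicial etapa → Pre_maximoEtapaInicial etapa → Spec_maximoEtapaInicial etapa (maximoEtapaInicial etapa)

-- ===== LEMMAS AND PROOFS =====

-- characterisation of A's running-max-with-reset loop
theorem loopA_char (g h0 : List Int → Int) (rows : List (List Int)) (acc : List Int) (n : Int) :
    rows.foldl
      (fun (p : List Int × Int) fila =>
        if g fila > p.2 then ([h0 fila], g fila)
        else if g fila == p.2 then (p.1 ++ [h0 fila], p.2)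
        else p) (acc, n)
    = ((if rows.foldl (fun a r => max a (g r)) n = n then acc else []) ++
        (rows.filter (fun r => g r == rows.foldl (fun a r => max a (g r)) n)).map h0,
       rows.foldl (fun a r => max a (g r)) n) := by
  induction rows generalizing acc n with
  | nil => simp
  | cons r t ih =>
    have hub := (PySem.List.le_foldl_max_int t g (max n (g r))).1
    simp only [List.foldl_cons, List.filter_cons]
    rcases lt_trichotomy n (g r) with h1 | h1 | h1
    · rw [if_pos (by exact h1), ih]
      have hm : max n (g r) = g r := max_eq_right h1.le
      simp only [hm] at hub ⊢
      have hne : t.foldl (fun a r => max a (g r)) (g r) ≠ n := by omega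
      by_cases he : g r = t.foldl (fun a r => max a (g r)) (g r)
      · simp only [beq_iff_eq, if_neg hne, if_pos he.symm, if_pos he, List.nil_append,
          List.map_cons, List.singleton_append]
      · simp only [beq_iff_eq, if_neg hne, if_neg (Ne.symm he), if_neg he, List.nil_append]
    · rw [if_neg (by omega), if_pos (by simp [h1]), ih]
      have hm : max n (g r) = n := by rw [h1]; exact max_self _
      simp only [hm] at hub ⊢
      by_cases he : t.foldl (fun a r => max a (g r)) n = n
      · simp [he, ← h1, List.append_assoc]
      · have : ¬ (g r = t.foldl (fun a r => max a (g r)) n) := by omega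
        simp [he, this]
    · rw [if_neg (by omega), if_neg (by simp; omega), ih]
      have hm : max n (g r) = n := max_eq_left h1.le
      simp only [hm] at hub ⊢
      have : ¬ (g r = t.foldl (fun a r => max a (g r)) n) := by omega
      simp [this]

-- ===== VERDICT (by name: the statement is the Claim_ definition above) =====
theorem maximoEtapaInicial_spec : Claim_equal_maximoEtapaInicial := by
  intro etapa _ hpre
  obtain ⟨hlen, _⟩ := hpre
  match etapa, hlen with
  | e0 :: r1 :: rest, _ =>
    show maximoEtapaInicial _ = maximoEtapaInicial_alt _
    unfold maximoEtapaInicial maximoEtapaInicial_alt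
    have hnum : PySem.List.pyGetD (e0 :: r1 :: rest) 1 ([] : List Int) = r1 := by
      rw [PySem.List.pyGetD_ofNat']; rfl
    simp only [hnum, List.drop_succ_cons, List.drop_zero, List.map_cons]
    rw [PySem.List.foldl_pyRange_pyGetD' (e0 :: r1 :: rest) ([] : List Int)
        (fun (p : List Int × Int) fila =>
          if PySem.List.pyGetD fila (-2) 0 > p.2 then
            ([PySem.List.pyGetD fila 0 0], PySem.List.pyGetD fila (-2) 0)
          else if PySem.List.pyGetD fila (-2) 0 == p.2 then
            (p.1 ++ [PySem.List.pyGetD fila 0 0], p.2)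
          else p)
        ([], PySem.List.pyGetD r1 (-2) 0) (by norm_num),
      PySem.List.max?_id_cons, List.foldl_map, loopA_char]
    simp only [Int.toNat_one, List.drop_succ_cons, List.drop_zero, List.foldl_cons, max_self,
      ite_self, List.nil_append]
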